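-- pv_equiv track=rewrite | github.com/LOUWPII/computation_theory | correo.py | verificar_puntos
-- ===== SOURCE A (Python) =====
-- def verificar_puntos(dominio):
--     if "." not in dominio:
--         return False
--     if dominio[0] == ".":
--         return False
--     if dominio[-1] == ".":
--         return False
--     for i, letra in enumerate(dominio):
--         if dominio[i] == "." and dominio[i+1] == ".":
--             return False
--     return True
-- ===== SOURCE B (Python) =====
-- def verificar_puntos(dominio):
--     parts = dominio.split(".")
--     return len(parts) > 1 and all(parts)
-- ===== Notes on version B (the rewrite author's own statement) =====
-- stated objective: simpler
-- what changed: Replaces A's four positional checks (membership test, first char, last char, adjacent-pair scan) by one split on '.' followed by len(parts)>1 and all parts nonempty.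
import Mathlib
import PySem

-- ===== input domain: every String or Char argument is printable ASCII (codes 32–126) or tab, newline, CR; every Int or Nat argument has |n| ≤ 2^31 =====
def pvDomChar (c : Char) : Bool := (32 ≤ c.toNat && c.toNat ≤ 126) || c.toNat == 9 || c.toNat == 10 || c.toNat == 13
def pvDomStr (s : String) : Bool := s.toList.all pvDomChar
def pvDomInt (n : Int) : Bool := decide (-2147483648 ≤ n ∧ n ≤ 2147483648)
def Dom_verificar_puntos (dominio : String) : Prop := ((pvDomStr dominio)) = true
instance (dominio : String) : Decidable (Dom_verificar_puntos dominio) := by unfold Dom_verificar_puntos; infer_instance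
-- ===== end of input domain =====

-- B replaces A's four positional checks (membership, first char, last char, adjacent-pair scan)
-- by one split on '.' plus "more than one part and every part nonempty" (objective: simpler).

-- ===== PORT A =====
-- A's loop `for i, letra in enumerate(dominio): if dominio[i]=="." and dominio[i+1]==".": return False`
-- as a pairwise scan; at the last index dominio[i+1] would raise, but that branch is reachable only
-- when the last character is '.', which A has already rejected — the port continues (returns true) there.
def vpPairScan : List Char → Bool
  | [] => true
  | [_] => true
  | a :: b :: rest => if a == '.' && b == '.' then false else vpPairScan (b :: rest)

def verificar_puntos (dominio : String) : Bool :=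
  if !(PySem.Str.isIn "." dominio) then false
  else if (PySem.Str.pyGet? dominio 0).getD ' ' == '.' then false
  else if (PySem.Str.pyGet? dominio (-1)).getD ' ' == '.' then false
  else vpPairScan dominio.toList

-- ===== PORT B =====
-- Source B: parts = dominio.split("."); return len(parts) > 1 and all(parts)
-- (PySem.Chars.splitOn is str.split with a nonempty separator, exact)
def verificar_puntos_alt (dominio : String) : Bool :=
  let parts := PySem.Chars.splitOn dominio.toList ['.']
  decide (1 < parts.length) && parts.all (fun p => !p.isEmpty)

-- ===== PRECONDITION & SPEC =====
def Spec_verificar_puntos (dominio : String) (out : Bool) : Prop := out = verificar_puntos_alt dominio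
instance (dominio : String) (out : Bool) : Decidable (Spec_verificar_puntos dominio out) := by unfold Spec_verificar_puntos; infer_instance

-- ===== CLAIM (what is proved, stated in full; the proofs are below) =====
def Claim_equal_verificar_puntos : Prop := ∀ (dominio : String), Dom_verificar_puntos dominio → Spec_verificar_puntos dominio (verificar_puntos dominio)

-- ===== LEMMAS AND PROOFS =====

/-- Simple recursion computing `cs.split('.')` (nonempty separator, singleton '.'). -/
def vpSplit1 : List Char → List (List Char)
  | [] => [[]]
  | c :: rest =>
    if c = '.' then [] :: vpSplit1 rest
    else
      match vpSplit1 rest with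
      | [] => [[c]]          -- unreachable: vpSplit1 never returns []
      | p :: ps => (c :: p) :: ps

theorem vpSplit1_ne_nil (cs : List Char) : vpSplit1 cs ≠ [] := by
  match cs with
  | [] => simp [vpSplit1]
  | c :: rest =>
    unfold vpSplit1
    split_ifs
    · simp
    · cases h : vpSplit1 rest <;> simp

/-- PySem's fuelled splitter, specialised to separator `['.']`, is `vpSplit1` (up to the running part). -/
theorem vpGo_eq (l : List Char) : ∀ (fuel : Nat) (cur : List Char) (acc : List (List Char)),
    l.length ≤ fuel →
    PySem.Chars.splitOn.go ['.'] fuel l cur acc =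
      acc.reverse ++ ((cur.reverse ++ (vpSplit1 l).headI) :: (vpSplit1 l).tail) := by
  induction l with
  | nil =>
    intro fuel cur acc _
    cases fuel <;> simp [PySem.Chars.splitOn.go, vpSplit1]
  | cons c rest ih =>
    intro fuel cur acc hf
    cases fuel with
    | zero => simp at hf
    | succ f =>
      by_cases hc : c = '.'
      · subst hc
        have hpre : (['.'] : List Char).isPrefixOf ('.' :: rest) = true := by
          simp [List.isPrefixOf]
        rw [PySem.Chars.splitOn.go]
        simp only [hpre, if_pos]
        rw [show List.drop (['.'] : List Char).length ('.' :: rest) = rest from rfl]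
        rw [ih f [] (cur.reverse :: acc) (by simpa using Nat.lt_succ_iff.mp (Nat.lt_of_lt_of_le (Nat.lt_succ_self _) (by simpa using hf)))]
        have hne := vpSplit1_ne_nil rest
        cases h : vpSplit1 rest with
        | nil => exact absurd h hne
        | cons p ps => simp [vpSplit1, h]
      · have hpre : (['.'] : List Char).isPrefixOf (c :: rest) = false := by
          simp [List.isPrefixOf]; intro h; exact hc h.symm
        rw [PySem.Chars.splitOn.go]
        simp only [hpre, Bool.false_eq_true, if_neg, not_false_iff]
        rw [ih f (c :: cur) acc (by simpa using Nat.lt_succ_iff.mp (by simpa using hf))]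
        have := vpSplit1_ne_nil rest
        cases h : vpSplit1 rest with
        | nil => exact absurd h this
        | cons p ps => simp [vpSplit1, hc, h]

theorem vpSplitOn_eq (cs : List Char) : PySem.Chars.splitOn cs ['.'] = vpSplit1 cs := by
  have := vpGo_eq cs (cs.length + 1) [] [] (Nat.le_succ _)
  rw [PySem.Chars.splitOn, this]
  have := vpSplit1_ne_nil cs
  cases h : vpSplit1 cs with
  | nil => exact absurd h this
  | cons p ps => simp

theorem vpSplit1_length (cs : List Char) : (vpSplit1 cs).length = cs.count '.' + 1 := by
  induction cs with
  | nil => simp [vpSplit1]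
  | cons c rest ih =>
    unfold vpSplit1
    by_cases hc : c = '.'
    · subst hc; simp [ih]
    · have := vpSplit1_ne_nil rest
      cases h : vpSplit1 rest with
      | nil => exact absurd h this
      | cons p ps =>
        simp only [if_neg hc]
        rw [List.count_cons]
        simp only [h] at ih
        simp only [List.length_cons] at ih ⊢
        simp [hc, ih]

/-- Characterisation of "every split part is nonempty". -/
theorem vpAll_iff (cs : List Char) :
    ((vpSplit1 cs).all (fun p => !p.isEmpty) = true) ↔
      (cs ≠ [] ∧ cs.head? ≠ some '.' ∧ cs.getLast? ≠ some '.' ∧ vpPairScan cs = true) := by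
  match cs with
  | [] => simp [vpSplit1]
  | [c] =>
    by_cases hc : c = '.' <;>
      simp [vpSplit1, hc, vpPairScan, List.all, List.getLast?]
  | a :: b :: r =>
    have ih : ((vpSplit1 (b :: r)).all (fun p => !p.isEmpty) = true) ↔
        ((b :: r) ≠ [] ∧ (b :: r).head? ≠ some '.' ∧ (b :: r).getLast? ≠ some '.' ∧ vpPairScan (b :: r) = true) :=
      vpAll_iff (b :: r)
    have ih2 : ((vpSplit1 r).all (fun p => !p.isEmpty) = true) ↔
        (r ≠ [] ∧ r.head? ≠ some '.' ∧ r.getLast? ≠ some '.' ∧ vpPairScan r = true) :=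
      vpAll_iff r
    by_cases ha : a = '.'
    · subst ha; simp [vpSplit1]
    · by_cases hb : b = '.'
      · subst hb
        -- vpSplit1 (a :: '.' :: r) = (a :: []) :: vpSplit1 r
        have hsp : vpSplit1 (a :: '.' :: r) = [a] :: vpSplit1 r := by
          rw [vpSplit1, if_neg ha, vpSplit1, if_pos rfl]
        rw [hsp]
        cases r with
        | nil =>
          simp [vpSplit1, List.getLast?]
        | cons x r' =>
          constructor
          · intro h
            simp only [List.all_cons, Bool.and_eq_true] at h
            have h2 := ih2.mp h.2
            refine ⟨by simp, by simp [ha], ?_, ?_⟩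
            · simpa [List.getLast?_cons_cons] using h2.2.2.1
            · have hx : x ≠ '.' := by
                intro hx; exact h2.2.1 (by simp [hx])
              simp [vpPairScan, ha, hx]
              exact h2.2.2.2
          · rintro ⟨-, -, hlast, hscan⟩
            simp only [List.all_cons, Bool.and_eq_true]
            refine ⟨by simp, ih2.mpr ?_⟩
            have hx : x ≠ '.' := by
              intro hx
              subst hx
              simp [vpPairScan, ha] at hscan
            refine ⟨by simp, by simp [hx], ?_, ?_⟩
            · simpa [List.getLast?_cons_cons] using hlast
            · simp [vpPairScan, ha, hx] at hscan
              exact hscan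
      · -- a ≠ '.', b ≠ '.': prepend a to the first part of vpSplit1 (b :: r)
        have hne := vpSplit1_ne_nil (b :: r)
        cases h : vpSplit1 (b :: r) with
        | nil => exact absurd h hne
        | cons p ps =>
          have hsp : vpSplit1 (a :: b :: r) = (a :: p) :: ps := by
            rw [vpSplit1, if_neg ha, h]
          -- p starts with b (b ≠ '.'), so p is nonempty
          have hp : p = b :: p.tail := by
            have := vpSplit1_ne_nil r
            cases hr : vpSplit1 r with
            | nil => exact absurd hr this
            | cons q qs =>
              simp [vpSplit1, hb, hr] at h
              rw [← h.1]
              simp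
          rw [hsp]
          simp only [h, List.all_cons, Bool.and_eq_true] at ih
          constructor
          · intro hall
            simp only [List.all_cons, Bool.and_eq_true] at hall
            have h2 := ih.mp ⟨by rw [hp]; simp, hall.2⟩
            refine ⟨by simp, by simp [ha], ?_, ?_⟩
            · simpa [List.getLast?_cons_cons] using h2.2.2.1
            · simp [vpPairScan, ha]
              exact h2.2.2.2
          · rintro ⟨-, -, hlast, hscan⟩
            have hscan' : vpPairScan (b :: r) = true := by
              simpa [vpPairScan, ha] using hscan
            have := ih.mpr ⟨by simp, by simp [hb], by simpa [List.getLast?_cons_cons] using hlast, hscan'⟩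
            simp only [List.all_cons, Bool.and_eq_true]
            exact ⟨by simp, this.2⟩
termination_by cs.length

theorem vpMem_iff (cs : List Char) : PySem.Chars.isIn ['.'] cs = true ↔ '.' ∈ cs := by
  rw [PySem.Chars.isIn_iff_infix]
  constructor
  · intro h; exact List.singleton_sublist.mp h.sublist
  · intro h
    obtain ⟨s, t, rfl⟩ := List.append_of_mem h
    exact ⟨s, t, by simp⟩

theorem vpHead (cs : List Char) (h : cs ≠ []) :
    ((PySem.List.pyGet? cs 0).getD ' ' == '.') = (cs.head? == some '.') := by
  cases cs with
  | nil => exact absurd rfl h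
  | cons a l => simp [PySem.List.pyGet?, PySem.List.pyIdx?]

theorem vpLast (cs : List Char) (h : cs ≠ []) :
    ((PySem.List.pyGet? cs (-1)).getD ' ' == '.') = (cs.getLast? == some '.') := by
  cases cs with
  | nil => exact absurd rfl h
  | cons a l =>
    have hidx : PySem.List.pyGet? (a :: l) (-1) = (a :: l).getLast? := by
      rw [PySem.List.pyGet?, PySem.List.pyIdx?]
      rw [if_neg (by omega), if_pos (by simp)]
      simp [List.getLast?_eq_getElem?]
    rw [hidx]
    rcases hl : (a :: l).getLast? with _ | c
    · exact absurd hl (by simp)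
    · simp

-- ===== VERDICT (by name: the statement is the Claim_ definition above) =====
theorem verificar_puntos_spec : Claim_equal_verificar_puntos := by
  intro dominio _
  unfold Spec_verificar_puntos verificar_puntos verificar_puntos_alt
  rw [PySem.Str.isIn_eq, PySem.Str.pyGet?_eq, PySem.Str.pyGet?_eq]
  simp only [PySem.Chars.pyGet?_eq_listPyGet?]
  have hsep : ("." : String).toList = ['.'] := rfl
  rw [hsep, vpSplitOn_eq]
  set cs := dominio.toList with hcs
  by_cases hmem : '.' ∈ cs
  · have hin : PySem.Chars.isIn ['.'] cs = true := (vpMem_iff cs).mpr hmem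
    have hne : cs ≠ [] := by intro h; rw [h] at hmem; simp at hmem
    have hlen : 1 < (vpSplit1 cs).length := by
      rw [vpSplit1_length]
      have : 0 < cs.count '.' := List.count_pos_iff.mpr hmem
      omega
    rw [hin]
    simp only [Bool.not_true, Bool.false_eq_true, if_neg, not_false_iff]
    simp only [vpHead cs hne, vpLast cs hne]
    simp only [decide_eq_true hlen, Bool.true_and]
    by_cases hh : cs.head? = some '.'
    · simp only [hh, beq_self_eq_true, if_pos]
      symm
      rw [← Bool.not_eq_true]
      intro hall
      exact ((vpAll_iff cs).mp hall).2.1 hh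
    · rw [if_neg (by simp [hh])]
      by_cases hl : cs.getLast? = some '.'
      · simp only [hl, beq_self_eq_true, if_pos]
        symm
        rw [← Bool.not_eq_true]
        intro hall
        exact ((vpAll_iff cs).mp hall).2.2.1 hl
      · rw [if_neg (by simp [hl])]
        rcases hscan : vpPairScan cs with _ | _
        · symm
          rw [← Bool.not_eq_true]
          intro hall
          rw [((vpAll_iff cs).mp hall).2.2.2] at hscan
          exact Bool.false_ne_true hscan.symm
        · symm
          exact (vpAll_iff cs).mpr ⟨hne, hh, hl, hscan⟩
  · have hin : PySem.Chars.isIn ['.'] cs = false := by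
      rcases h : PySem.Chars.isIn ['.'] cs with _ | _
      · rfl
      · exact absurd ((vpMem_iff cs).mp h) hmem
    rw [hin]
    have hlen : ¬ (1 < (vpSplit1 cs).length) := by
      rw [vpSplit1_length]
      have : cs.count '.' = 0 := by
        simp [List.count_eq_zero]
        intro h; exact hmem h
      omega
    simp [hlen]
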